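-- pv_equiv track=rewrite | github.com/jason88012/ImageEncryption | diffusion.py | eXOR
-- ===== SOURCE A (Python) =====
-- def eXOR(x, r):
-- 	result = []
-- 	bin_x = bin(x)[2:].zfill(8)
-- 	bin_r = bin(r)[2:].zfill(9)
-- 	for i in range(len(bin_x)):
-- 		xi, ri, rii = bool(int(bin_x[i])), bool(int(bin_r[i])), bool(int(bin_r[i+1]))
-- 		result.append(str(int(not(xi^ri^rii))))
-- 	return int(''.join(result), 2)
-- ===== SOURCE B (Python) =====
-- def eXOR(x, r):
--     return ~(x ^ r ^ (r >> 1)) & 0xFF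
-- ===== Notes on version B (the rewrite author's own statement) =====
-- stated objective: idiomatic
-- what changed: Replaced A's build-two-binary-strings/zfill/char-loop/parse-back pipeline with the one-line bitwise XNOR ~(x ^ r ^ (r >> 1)) & 0xFF; Pre_ keeps the function's 8-bit/9-bit domain (0 <= x < 256, 0 <= r < 512): outside it A either raises (negative arguments, or bin_x at least as long as bin_r) or returns a value taken from accidental alignment of the top bits of longer binary strings, a quirk of the string indexing.
-- outside the precondition, e.g. on eXOR(0, 512): A returns 127, B returns 255; on eXOR(300, 2000): A returns 207, B returns 235; on eXOR(-1, 5): A raises ValueError, B returns 7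
import Mathlib
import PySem

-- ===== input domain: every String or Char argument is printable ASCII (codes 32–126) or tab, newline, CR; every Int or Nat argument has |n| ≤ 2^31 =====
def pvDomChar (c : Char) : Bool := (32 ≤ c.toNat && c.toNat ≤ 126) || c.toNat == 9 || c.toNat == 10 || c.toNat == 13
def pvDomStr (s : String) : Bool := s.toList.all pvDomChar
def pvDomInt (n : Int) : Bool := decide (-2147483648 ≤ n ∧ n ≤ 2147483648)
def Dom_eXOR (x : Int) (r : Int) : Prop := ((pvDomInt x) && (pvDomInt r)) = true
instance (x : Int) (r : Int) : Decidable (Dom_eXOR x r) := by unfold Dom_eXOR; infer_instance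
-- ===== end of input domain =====

-- B replaces A's binary-string building/parsing loop with the one-line 8-bit XNOR
-- ~(x ^ r ^ (r >> 1)) & 0xFF (idiomatic bit arithmetic, no strings or loops).

-- ===== PORT A =====
-- bin(n)[2:] for n ≥ 0 (MSB first, no prefix); pvBinGo gives [] for 0, pvBin gives "0".
def pvBinGo (n : Nat) : List Char :=
  if _h : n = 0 then []
  else pvBinGo (n / 2) ++ [if n % 2 = 1 then '1' else '0']
decreasing_by exact Nat.div_lt_self (Nat.pos_of_ne_zero _h) one_lt_two

def pvBin (n : Nat) : List Char := if n = 0 then ['0'] else pvBinGo n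

-- str.zfill(w)
def pvZfill (w : Nat) (l : List Char) : List Char := List.replicate (w - l.length) '0' ++ l

-- Literal port of A for its non-raising inputs: x ≥ 0, r ≥ 0 and every index in range
-- (negative arguments make Python's int() raise ValueError, short bin_r makes bin_r[i+1]
-- raise IndexError; both are outside Pre_eXOR, so getD's default is never taken there).
def eXOR (x : Int) (r : Int) : Int :=
  let binx := pvZfill 8 (pvBin x.toNat)
  let binr := pvZfill 9 (pvBin r.toNat)
  let result := (List.range binx.length).foldl (fun acc i =>
      let xi := binx.getD i '0' == '1'
      let ri := binr.getD i '0' == '1'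
      let rii := binr.getD (i + 1) '0' == '1'
      acc ++ [if !((xi.xor ri).xor rii) then '1' else '0']) ([] : List Char)
  result.foldl (fun a c => 2 * a + (if c == '1' then 1 else 0)) (0 : Int)

-- ===== PORT B =====
-- ~v & 0xFF on a nonnegative int equals (v ^ 0xFF) & 0xFF bit for bit; Pre_ keeps x, r ≥ 0.
def eXOR_alt (x : Int) (r : Int) : Int :=
  ((((x.toNat ^^^ r.toNat ^^^ (r.toNat >>> 1)) ^^^ 255) &&& 255 : Nat) : Int)

-- ===== PRECONDITION & SPEC =====
-- Pre_ keeps the function's intended 8-bit x / 9-bit r domain. Outside it A either raises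
-- (negative arguments: ValueError in int(); bin_x at least as long as bin_r: IndexError at
-- bin_r[i+1]) or, for x ≥ 256 or r ≥ 512, returns a value read off accidentally aligned TOP
-- bits of the longer binary strings — an artefact of the string indexing, excluded here.
def Pre_eXOR (x : Int) (r : Int) : Prop :=
  0 ≤ x ∧ x < 256 ∧ 0 ≤ r ∧ r < 512
instance (x : Int) (r : Int) : Decidable (Pre_eXOR x r) := by unfold Pre_eXOR; infer_instance

def pvWitness_eXOR : Int × Int := (5, 300)

def Spec_eXOR (x : Int) (r : Int) (out : Int) : Prop := out = eXOR_alt x r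
instance (x : Int) (r : Int) (out : Int) : Decidable (Spec_eXOR x r out) := by unfold Spec_eXOR; infer_instance

-- ===== CLAIM (what is proved, stated in full; the proofs are below) =====
def Claim_equal_eXOR : Prop := ∀ (x : Int) (r : Int), Dom_eXOR x r → Pre_eXOR x r → Spec_eXOR x r (eXOR x r)

-- ===== LEMMAS AND PROOFS =====

theorem size_eq_succ (n : Nat) (h : n ≠ 0) : n.size = (n / 2).size + 1 := by
  apply Nat.le_antisymm
  · rw [Nat.size_le]
    have h1 : n / 2 < 2 ^ (n / 2).size := Nat.lt_size_self _
    have : n ≤ 2 * (n / 2) + 1 := by omega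
    calc n ≤ 2 * (n / 2) + 1 := this
      _ < 2 ^ ((n / 2).size + 1) := by rw [pow_succ]; omega
  · have h2 : 2 ^ (n / 2).size ≤ n := by
      rcases Nat.eq_zero_or_pos (n / 2) with h0 | h0
      · simp [h0]; omega
      · have hs : (n / 2).size ≠ 0 := by
          intro hc
          have h3 := Nat.lt_size_self (n / 2)
          rw [hc] at h3
          omega
        obtain ⟨k, hk⟩ : ∃ k, (n / 2).size = k + 1 := ⟨(n/2).size - 1, by omega⟩
        have : 2 ^ k ≤ n / 2 := Nat.lt_size.mp (by omega)
        rw [hk, pow_succ]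
        omega
    have := Nat.lt_size.mpr h2
    omega

theorem pvBinGo_length (n : Nat) : (pvBinGo n).length = n.size := by
  induction n using Nat.strong_induction_on with
  | _ n ih =>
    rw [pvBinGo]
    split
    · simp [*]
    · rename_i h
      simp [ih (n / 2) (Nat.div_lt_self (Nat.pos_of_ne_zero h) one_lt_two), size_eq_succ n h]

theorem pvBin_length (n : Nat) : (pvBin n).length = max 1 n.size := by
  unfold pvBin
  split
  · simp [*, Nat.size_zero]
  · rename_i h
    rw [pvBinGo_length]
    have h3 := Nat.lt_size_self n
    have : n.size ≠ 0 := by intro hc; rw [hc] at h3; omega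
    omega

theorem pvBinGo_getD (n i : Nat) (hi : i < n.size) :
    (pvBinGo n).getD i '0' = if n.testBit (n.size - 1 - i) then '1' else '0' := by
  induction n using Nat.strong_induction_on generalizing i with
  | _ n ih =>
    have hn : n ≠ 0 := by rintro rfl; simp at hi
    rw [pvBinGo]
    simp only [hn, dite_false]
    have hlen : (pvBinGo (n / 2)).length = (n / 2).size := pvBinGo_length _
    have hsz : n.size = (n / 2).size + 1 := size_eq_succ n hn
    rcases Nat.lt_or_ge i (n / 2).size with hlt | hge
    · rw [List.getD_eq_getElem?_getD, List.getElem?_append_left (by omega), ← List.getD_eq_getElem?_getD]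
      rw [ih (n / 2) (Nat.div_lt_self (Nat.pos_of_ne_zero hn) one_lt_two) i hlt]
      have h1 : n.size - 1 - i = ((n / 2).size - 1 - i) + 1 := by omega
      rw [h1, Nat.testBit_add_one]
    · have hie : i = (n / 2).size := by omega
      rw [List.getD_eq_getElem?_getD, List.getElem?_append_right (by omega)]
      have h0 : n.size - 1 - i = 0 := by omega
      have hb : n.testBit (n.size - 1 - (n / 2).size) = decide (n % 2 = 1) := by
        rw [show n.size - 1 - (n / 2).size = 0 by omega, Nat.testBit_zero]
      simp only [hie, hlen, Nat.sub_self, List.getElem?_cons_zero, Option.getD_some, hb]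
      rcases Nat.mod_two_eq_zero_or_one n with h | h <;> simp [h]

theorem pvBin_getD (n i : Nat) (hi : i < (pvBin n).length) :
    (pvBin n).getD i '0' = if n.testBit ((pvBin n).length - 1 - i) then '1' else '0' := by
  unfold pvBin at *
  split at hi
  · rename_i h
    subst h
    have h0 : i = 0 := by simpa using hi
    subst h0
    simp
  · rename_i h
    rw [pvBinGo_length] at hi
    simp only [if_neg h]
    rw [pvBinGo_getD n i hi, pvBinGo_length]

theorem pvZfill_length (w : Nat) (l : List Char) : (pvZfill w l).length = max w l.length := by
  simp [pvZfill]; omega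

theorem pvZfill_bin_getD (n w i : Nat) (hi : i < (pvZfill w (pvBin n)).length) :
    (pvZfill w (pvBin n)).getD i '0'
      = if n.testBit ((pvZfill w (pvBin n)).length - 1 - i) then '1' else '0' := by
  have hlen := pvZfill_length w (pvBin n)
  have hbl := pvBin_length n
  have hn2 := Nat.lt_size_self n
  rw [hlen] at hi ⊢
  unfold pvZfill
  rcases Nat.lt_or_ge i (w - (pvBin n).length) with hlt | hge
  · rw [List.getD_eq_getElem?_getD, List.getElem?_append_left (by simpa using hlt)]
    have hbit : n.testBit (max w (pvBin n).length - 1 - i) = false := by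
      apply Nat.testBit_lt_two_pow
      calc n < 2 ^ n.size := hn2
        _ ≤ 2 ^ (max w (pvBin n).length - 1 - i) := by
            apply Nat.pow_le_pow_right (by norm_num)
            omega
    simp [hbit, hlt]
  · rw [List.getD_eq_getElem?_getD, List.getElem?_append_right (by simpa using hge)]
    have hj : i - (List.replicate (w - (pvBin n).length) '0').length < (pvBin n).length := by
      simp; omega
    rw [← List.getD_eq_getElem?_getD, List.length_replicate]
    rw [pvBin_getD n _ (by simpa using hj)]
    have harg : (pvBin n).length - 1 - (i - (w - (pvBin n).length))
        = max w (pvBin n).length - 1 - i := by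
      simp only [List.length_replicate] at hj
      omega
    rw [harg]

theorem foldl_snoc_map {α β : Type} (f : α → β) (l : List α) (acc : List β) :
    l.foldl (fun acc i => acc ++ [f i]) acc = acc ++ l.map f := by
  induction l generalizing acc with
  | nil => simp
  | cons a l ih => simp [List.foldl_cons, ih]

theorem fold_val (g : Nat → Bool) (k : Nat) (acc : Int) :
    ((List.range k).map (fun i => if g i then '1' else '0')).foldl
        (fun a c => 2 * a + (if c == '1' then 1 else 0)) acc
      = acc * 2 ^ k + ∑ i ∈ Finset.range k, (if g i then (2 : Int) ^ (k - 1 - i) else 0) := by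
  induction k generalizing acc with
  | zero => simp
  | succ k ih =>
    rw [List.range_succ, List.map_append, List.foldl_append, ih]
    simp only [List.map_cons, List.map_nil, List.foldl_cons, List.foldl_nil]
    rw [Finset.sum_range_succ]
    have hst : ∀ i ∈ Finset.range k, (if g i then (2 : Int) ^ (k + 1 - 1 - i) else 0)
        = 2 * (if g i then (2 : Int) ^ (k - 1 - i) else 0) := by
      intro i hi
      rw [Finset.mem_range] at hi
      have : k + 1 - 1 - i = (k - 1 - i) + 1 := by omega
      rw [this]
      split <;> ring
    rw [Finset.sum_congr rfl hst]
    rw [show k + 1 - 1 - k = 0 by omega]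
    cases hk : g k <;>
      simp only [if_true, pow_zero, Char.reduceBEq] <;>
      · rw [mul_add, Finset.mul_sum]
        simp
        ring

theorem sum_testBit (n : Nat) (M : Nat) :
    ∑ i ∈ Finset.range M, (if n.testBit i then (2 : Int) ^ i else 0) = ((n % 2 ^ M : Nat) : Int) := by
  induction M with
  | zero => simp
  | succ M ih =>
    rw [Finset.sum_range_succ, ih]
    have hb : n.testBit M = decide (n / 2 ^ M % 2 = 1) := Nat.testBit_eq_decide_div_mod_eq ..
    have hm : n % 2 ^ (M + 1) = n % 2 ^ M + 2 ^ M * (n / 2 ^ M % 2) := Nat.mod_pow_succ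
    rcases Nat.mod_two_eq_zero_or_one (n / 2 ^ M) with h | h <;>
      · rw [hb, hm, h]
        push_cast
        norm_num

theorem sum_reflect8 (N : Nat) :
    (∑ i ∈ Finset.range 8, if N.testBit (7 - i) then (2:Int) ^ (8 - 1 - i) else 0)
      = ∑ j ∈ Finset.range 8, (if N.testBit j then (2:Int) ^ j else 0) := by
  rw [← Finset.sum_range_reflect (fun j => if N.testBit j then (2:Int) ^ j else 0) 8]

-- ===== VERDICT (by name: the statement is the Claim_ definition above) =====
theorem eXOR_spec : Claim_equal_eXOR := by
  intro x r _ hpre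
  obtain ⟨hx0, hx, hr0, hr⟩ := hpre
  unfold Spec_eXOR eXOR eXOR_alt
  simp only []
  set a := x.toNat with ha
  set b := r.toNat with hb
  have hsa : Nat.size a ≤ 8 := Nat.size_le.mpr (by omega)
  have hsb : Nat.size b ≤ 9 := Nat.size_le.mpr (by omega)
  set N := ((a ^^^ b ^^^ (b >>> 1) ^^^ 255) &&& 255) with hN
  have hlx : (pvZfill 8 (pvBin a)).length = 8 := by
    rw [pvZfill_length, pvBin_length]; omega
  have hlr : (pvZfill 9 (pvBin b)).length = 9 := by
    rw [pvZfill_length, pvBin_length]; omega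
  have hNle : N < 2 ^ 8 := by
    have h1 : N ≤ 255 := Nat.and_le_right
    omega
  have hbit : ∀ i, i < 8 → N.testBit (7 - i)
      = !(((a.testBit (7 - i)).xor (b.testBit (8 - i))).xor (b.testBit (7 - i))) := by
    intro i hi
    rw [hN, show (255 : Nat) = 2 ^ 8 - 1 from rfl]
    rw [Nat.testBit_and, Nat.testBit_xor, Nat.testBit_xor, Nat.testBit_xor,
        Nat.testBit_shiftRight, Nat.testBit_two_pow_sub_one]
    rw [show 1 + (7 - i) = 8 - i by omega]
    have hlt : (7 - i) < 8 := by omega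
    simp only [hlt, decide_true, Bool.and_true]
    cases a.testBit (7 - i) <;> cases b.testBit (8 - i) <;>
      cases b.testBit (7 - i) <;> rfl
  rw [hlx]
  rw [foldl_snoc_map (fun i =>
      if !(((pvZfill 8 (pvBin a)).getD i '0' == '1').xor
            ((pvZfill 9 (pvBin b)).getD i '0' == '1') |>.xor
            ((pvZfill 9 (pvBin b)).getD (i + 1) '0' == '1')) then '1' else '0')]
  rw [List.nil_append]
  have hmap : (List.range 8).map (fun i =>
      if !(((pvZfill 8 (pvBin a)).getD i '0' == '1').xor
            ((pvZfill 9 (pvBin b)).getD i '0' == '1') |>.xor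
            ((pvZfill 9 (pvBin b)).getD (i + 1) '0' == '1')) then '1' else '0')
      = (List.range 8).map (fun i => if N.testBit (7 - i) then '1' else '0') := by
    apply List.map_congr_left
    intro i hi
    rw [List.mem_range] at hi
    have hxc : (pvZfill 8 (pvBin a)).getD i '0' = if a.testBit (7 - i) then '1' else '0' := by
      have := pvZfill_bin_getD a 8 i (by omega)
      rwa [hlx, show 8 - 1 - i = 7 - i by omega] at this
    have hrc : (pvZfill 9 (pvBin b)).getD i '0' = if b.testBit (8 - i) then '1' else '0' := by
      have := pvZfill_bin_getD b 9 i (by omega)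
      rwa [hlr, show 9 - 1 - i = 8 - i by omega] at this
    have hrc2 : (pvZfill 9 (pvBin b)).getD (i + 1) '0'
        = if b.testBit (7 - i) then '1' else '0' := by
      have := pvZfill_bin_getD b 9 (i + 1) (by omega)
      rw [hlr] at this
      rwa [show 9 - 1 - (i + 1) = 7 - i by omega] at this
    rw [hxc, hrc, hrc2, hbit i hi]
    cases a.testBit (7 - i) <;> cases b.testBit (8 - i) <;>
      cases b.testBit (7 - i) <;> rfl
  rw [hmap, fold_val (fun i => N.testBit (7 - i)) 8 0]
  rw [sum_reflect8 N, sum_testBit, Nat.mod_eq_of_lt hNle]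
  ring
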